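-- pv_equiv track=rewrite | github.com/TDTU-K25/discrete-structures | Lab/version1/Lab03/Lab03.py | ex3_d
-- ===== SOURCE A (Python) =====
-- def implication(a, b):
--     if (a == True and b == False):
--         return False
--     return True
--
-- def ex3_d(truths):
--     truth_table_notP_implies_q = []
--     truth_table_not_p_implies_p = []
--
--     for item in truths:
--         if item[0] == 1:
--             a = True
--         else:
--             a = False
--
--         if item[1] == 1:
--             b = True
--         else:
--             b = False
--
--         truth_table_notP_implies_q.append(implication(not (a), b))
--         truth_table_not_p_implies_p.append(not (implication(a, a)))
--
--     isEquivalent = True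
--     for i in range(len(truth_table_notP_implies_q)):
--         if (truth_table_notP_implies_q[i] != truth_table_not_p_implies_p[i]):
--             isEquivalent = False
--             break
--
--     return isEquivalent
-- ===== SOURCE B (Python) =====
-- def implication(a, b):
--     if (a == True and b == False):
--         return False
--     return True
--
-- def ex3_d(truths):
--     return all(
--         implication(not (item[0] == 1), item[1] == 1)
--         == (not implication(item[0] == 1, item[0] == 1))
--         for item in truths
--     )
-- ===== Notes on version B (the rewrite author's own statement) =====
-- stated objective: simpler
-- what changed: Replaces the two buffered truth-table lists and the separate index-comparison loop with a single short-circuiting all() pass that compares the two column values per row directly.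
import Mathlib
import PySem

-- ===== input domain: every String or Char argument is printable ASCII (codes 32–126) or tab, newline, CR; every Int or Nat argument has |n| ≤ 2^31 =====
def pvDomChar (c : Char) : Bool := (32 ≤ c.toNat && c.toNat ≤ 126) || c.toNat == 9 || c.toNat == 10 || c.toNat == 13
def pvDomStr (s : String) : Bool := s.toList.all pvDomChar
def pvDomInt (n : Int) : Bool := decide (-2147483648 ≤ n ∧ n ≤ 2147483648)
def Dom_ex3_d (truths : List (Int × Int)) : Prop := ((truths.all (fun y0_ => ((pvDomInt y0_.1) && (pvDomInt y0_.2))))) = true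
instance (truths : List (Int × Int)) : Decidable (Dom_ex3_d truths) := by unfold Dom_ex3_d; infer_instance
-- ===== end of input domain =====

-- B replaces A's two buffered truth-table lists and separate comparison loop by one
-- short-circuiting all() pass (objective: simpler).

-- ===== PORT A =====
-- helper 'implication' from the module
def pvImplication (a b : Bool) : Bool := if a == true && b == false then false else true

-- second loop of A: walk the two tables in index order, break at the first mismatch
def pvScanEq : List Bool → List Bool → Bool
  | x :: xs, y :: ys => if x != y then false else pvScanEq xs ys
  | _, _ => true

def ex3_d (truths : List (Int × Int)) : Bool :=
  let tables := truths.foldl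
    (fun (acc : List Bool × List Bool) item =>
      let a := item.1 == 1
      let b := item.2 == 1
      (acc.1 ++ [pvImplication (!a) b], acc.2 ++ [!(pvImplication a a)]))
    ([], [])
  pvScanEq tables.1 tables.2

-- ===== PORT B =====
def ex3_d_alt (truths : List (Int × Int)) : Bool :=
  truths.all (fun item =>
    pvImplication (!(item.1 == 1)) (item.2 == 1) == !(pvImplication (item.1 == 1) (item.1 == 1)))

-- ===== PRECONDITION & SPEC =====
def Spec_ex3_d (truths : List (Int × Int)) (out : Bool) : Prop := out = ex3_d_alt truths
instance (truths : List (Int × Int)) (out : Bool) : Decidable (Spec_ex3_d truths out) := by unfold Spec_ex3_d; infer_instance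

-- ===== CLAIM (what is proved, stated in full; the proofs are below) =====
def Claim_equal_ex3_d : Prop := ∀ (truths : List (Int × Int)), Dom_ex3_d truths → Spec_ex3_d truths (ex3_d truths)

-- ===== LEMMAS AND PROOFS =====
def pvF (item : Int × Int) : Bool := pvImplication (!(item.1 == 1)) (item.2 == 1)
def pvG (item : Int × Int) : Bool := !(pvImplication (item.1 == 1) (item.1 == 1))

theorem pv_foldl_tables (ts : List (Int × Int)) (l1 l2 : List Bool) :
    ts.foldl
      (fun (acc : List Bool × List Bool) item =>
        let a := item.1 == 1
        let b := item.2 == 1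
        (acc.1 ++ [pvImplication (!a) b], acc.2 ++ [!(pvImplication a a)]))
      (l1, l2)
    = (l1 ++ ts.map pvF, l2 ++ ts.map pvG) := by
  induction ts generalizing l1 l2 with
  | nil => simp
  | cons t ts ih => simp [List.foldl, ih, pvF, pvG]

theorem pv_scanEq_map (ts : List (Int × Int)) :
    pvScanEq (ts.map pvF) (ts.map pvG) = ts.all (fun t => pvF t == pvG t) := by
  induction ts with
  | nil => rfl
  | cons t ts ih =>
      simp only [List.map, List.all_cons, pvScanEq, ← ih]
      cases h : pvF t == pvG t <;> simp_all [bne]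

-- ===== VERDICT (by name: the statement is the Claim_ definition above) =====
theorem ex3_d_spec : Claim_equal_ex3_d := by
  intro truths _
  unfold Spec_ex3_d ex3_d ex3_d_alt
  rw [pv_foldl_tables]
  simpa [pvF, pvG] using pv_scanEq_map truths
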